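-- pv_equiv track=rewrite | github.com/MayflyDestiny/Rule-Bot | src/utils/domain_utils.py | get_domain_levels
-- ===== SOURCE A (Python) =====
-- def get_domain_levels(domain: str) -> list:
--     """获取域名的各级"""
--     if not domain:
--         return []
--
--     parts = domain.split('.')
--     levels = []
--
--     # 从二级域名开始构建各级域名
--     for i in range(len(parts) - 1, 0, -1):
--         level_domain = '.'.join(parts[i-1:])
--         levels.append(level_domain)
--
--     return levels
-- ===== SOURCE B (Python) =====
-- def get_domain_levels(domain: str) -> list:
--     """获取域名的各级"""
--     levels = []
--     suffix = None
--     for part in reversed(domain.split('.')):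
--         if suffix is None:
--             suffix = part
--         else:
--             suffix = part + '.' + suffix
--             levels.append(suffix)
--     return levels
-- ===== Notes on version B (the rewrite author's own statement) =====
-- stated objective: simpler
-- what changed: Single reverse pass maintaining a running suffix accumulator (each level built by one concatenation onto the previous), instead of re-slicing and re-joining parts[i-1:] from scratch for every index of a reversed range.
import Mathlib
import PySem

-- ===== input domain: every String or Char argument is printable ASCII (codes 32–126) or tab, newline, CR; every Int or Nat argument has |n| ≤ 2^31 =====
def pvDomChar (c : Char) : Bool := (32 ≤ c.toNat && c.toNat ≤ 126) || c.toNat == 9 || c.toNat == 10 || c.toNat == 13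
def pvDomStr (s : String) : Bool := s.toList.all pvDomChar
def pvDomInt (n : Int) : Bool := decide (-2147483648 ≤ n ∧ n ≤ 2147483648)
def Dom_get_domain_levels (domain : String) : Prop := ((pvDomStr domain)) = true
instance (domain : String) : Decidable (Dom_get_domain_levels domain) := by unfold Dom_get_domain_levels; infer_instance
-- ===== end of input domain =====

-- B replaces A's reversed index range with per-level slice+join by a single reverse
-- pass keeping a running suffix accumulator (objective: simpler; same asymptotic cost).


-- ===== PORT A =====
-- domain.split('.') has the literal non-empty separator '.', so the total Chars.splitOn
-- form is exact (wrapped back to String with String.ofList).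
def get_domain_levels (domain : String) : List String :=
  if domain = "" then []
  else
    let parts : List String := (PySem.Chars.splitOn domain.toList ['.']).map String.ofList
    (PySem.List.pyRange ((parts.length : Int) - 1) 0 (-1)).foldl
      (fun levels i =>
        levels ++ [PySem.Str.join "." (PySem.List.slice parts (some (i - 1)) none)]) []

-- ===== PORT B =====
-- state = (levels, suffix : Option String); 'suffix is None' is the first-iteration branch
def altStep (st : List String × Option String) (part : String) : List String × Option String :=
  match st.2 with
  | none => (st.1, some part)
  | some suffix => (st.1 ++ [part ++ "." ++ suffix], some (part ++ "." ++ suffix))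

def get_domain_levels_alt (domain : String) : List String :=
  ((((PySem.Chars.splitOn domain.toList ['.']).map String.ofList).reverse.foldl
      altStep ([], none))).1

-- ===== PRECONDITION & SPEC =====
def Spec_get_domain_levels (domain : String) (out : List String) : Prop := out = get_domain_levels_alt domain
instance (domain : String) (out : List String) : Decidable (Spec_get_domain_levels domain out) := by unfold Spec_get_domain_levels; infer_instance

-- ===== CLAIM (what is proved, stated in full; the proofs are below) =====
def Claim_equal_get_domain_levels : Prop := ∀ (domain : String), Dom_get_domain_levels domain → Spec_get_domain_levels domain (get_domain_levels domain)

-- ===== LEMMAS AND PROOFS =====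

theorem joinStr_singleton (p : String) : PySem.Str.join "." [p] = p := by
  rw [← String.toList_inj, PySem.Str.toList_join]
  simp [PySem.Chars.join_singleton]

theorem joinStr_cons_cons (p q : String) (rest : List String) :
    PySem.Str.join "." (p :: q :: rest) = p ++ "." ++ PySem.Str.join "." (q :: rest) := by
  rw [← String.toList_inj, PySem.Str.toList_join]
  simp [PySem.Chars.join_cons_cons, PySem.Str.toList_join]

-- characterization of B's fold over the reversed parts list
theorem alt_fold_char (ps : List String) :
    ps.reverse.foldl altStep ([], none) =
      ((List.range (ps.length - 1)).reverse.map
         (fun k => PySem.Str.join "." (ps.drop k)),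
       if ps = [] then none else some (PySem.Str.join "." ps)) := by
  induction ps with
  | nil => simp
  | cons p ps' ih =>
    rw [List.reverse_cons, List.foldl_append, ih]
    cases ps' with
    | nil => simp [altStep, joinStr_singleton]
    | cons q t =>
      simp only [List.foldl_cons, List.foldl_nil, altStep, List.length_cons,
        Nat.add_sub_cancel, reduceCtorEq, if_false]
      have h1 : List.range (t.length + 1) = 0 :: (List.range t.length).map Nat.succ :=
        List.range_succ_eq_map
      rw [h1, List.reverse_cons, List.map_append]
      simp only [List.map_cons, List.map_nil, List.drop_zero, List.map_reverse,
        List.map_map, Function.comp_def, List.drop_succ_cons, joinStr_cons_cons]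


-- range(m, 0, -1) is [m, m-1, …, 1]
theorem pyRange_down (m : Nat) :
    PySem.List.pyRange (m : Int) 0 (-1) = (List.range m).reverse.map (fun k : Nat => ((k : Int) + 1)) := by
  rcases Nat.eq_zero_or_pos m with h | h
  · subst h; decide
  · simp only [PySem.List.pyRange]
    rw [if_neg (by norm_num), if_neg (by norm_num), if_pos (by exact_mod_cast h)]
    have hc : (((m : Int) - 0 + -(-1) - 1) / -(-1)).toNat = m := by simp
    rw [hc]
    apply List.ext_getElem
    · simp
    · intro i h1 h2
      simp only [List.getElem_map, List.getElem_reverse, List.length_range,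
        List.getElem_range]
      have hi : i < m := by simpa using h1
      omega


theorem get_domain_levels_spec' (domain : String) :
    get_domain_levels domain = get_domain_levels_alt domain := by
  unfold get_domain_levels get_domain_levels_alt
  by_cases hd : domain = ""
  · subst hd; decide
  · rw [if_neg hd]
    set parts : List String := (PySem.Chars.splitOn domain.toList ['.']).map String.ofList with hp
    rw [alt_fold_char]
    cases parts with
    | nil => simp [PySem.List.pyRange]
    | cons p t =>
      simp only [List.length_cons, Nat.add_sub_cancel]
      have hcast : (((t.length + 1 : Nat) : Int)) - 1 = ((t.length : Nat) : Int) := by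
        push_cast; ring
      rw [hcast, pyRange_down, PySem.List.foldl_append_singleton_eq_map, List.nil_append,
        List.map_reverse, List.map_reverse, List.map_map]
      rw [show List.map (fun k => PySem.Str.join "." (List.drop k (p :: t)))
            (List.range t.length).reverse
          = (List.map (fun k => PySem.Str.join "." (List.drop k (p :: t)))
              (List.range t.length)).reverse from List.map_reverse ..]
      congr 1
      apply List.map_congr_left
      intro k _
      simp only [Function.comp_def]
      have h2 : (k : Int) + 1 - 1 = ((k : Nat) : Int) := by ring
      rw [h2, PySem.List.slice_from_natCast]

-- ===== VERDICT (by name: the statement is the Claim_ definition above) =====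
theorem get_domain_levels_spec : Claim_equal_get_domain_levels := by
  intro domain _
  unfold Spec_get_domain_levels
  exact get_domain_levels_spec' domain
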